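-- pv_equiv track=rewrite | github.com/kitsing/neural-graph-to-seq-mp | AMR_multiline_to_singleline.py | get_single_line_amrs
-- ===== SOURCE A (Python) =====
-- def get_single_line_amrs(line_iterator):
--     ids = []
--     id_dict = {}
--     amrs = []
--     amr_str = ''
--     sentence_str = None
--     for line in line_iterator:
--         if line.startswith('#'):
--             if line.startswith('# ::id'):
--                 id = line.strip().split('# ::id ')[1]
--                 ids.append(id)
--                 id_dict[id] = len(ids) - 1
--             elif line.startswith('# ::snt '):
--                 sentence_str = line.strip()[len('# ::snt '):]
--             continue
--         line = line.strip()
--         if line == '':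
--             if amr_str != '':
--                 amrs.append((amr_str.strip(), sentence_str))
--                 amr_str = ''
--         else:
--             amr_str = amr_str + line + ' '
--     if amr_str != '':
--         amrs.append((amr_str.strip(), sentence_str))
--     return amrs, id_dict
-- ===== SOURCE B (Python) =====
-- def get_single_line_amrs(line_iterator):
--     lines = list(line_iterator)
--     # pass 1: the id table, indexed by order of appearance of '# ::id' lines
--     id_dict = {}
--     n = 0
--     for line in lines:
--         if line.startswith('# ::id'):
--             id_dict[line.strip().split('# ::id ')[1]] = n
--             n += 1
--     # pass 2: group non-comment content lines into blank-separated runs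
--     amrs = []
--     sentence_str = None
--     chunk = []
--     for line in lines:
--         if line.startswith('#'):
--             if line.startswith('# ::snt '):
--                 sentence_str = line.strip()[len('# ::snt '):]
--         else:
--             stripped = line.strip()
--             if stripped:
--                 chunk.append(stripped)
--             elif chunk:
--                 amrs.append((' '.join(chunk), sentence_str))
--                 chunk = []
--     if chunk:
--         amrs.append((' '.join(chunk), sentence_str))
--     return amrs, id_dict
-- ===== Notes on version B (the rewrite author's own statement) =====
-- stated objective: faster
-- what changed: A threads one five-field accumulator (ids list, dict, output, growing amr string, sentence) through a single loop, rebuilding the amr string by concatenation at every content line; B makes two independent passes - one builds the id table with a plain counter, the other collects each block's stripped content lines in a list and joins them with ' ' once at flush.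
import Mathlib
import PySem

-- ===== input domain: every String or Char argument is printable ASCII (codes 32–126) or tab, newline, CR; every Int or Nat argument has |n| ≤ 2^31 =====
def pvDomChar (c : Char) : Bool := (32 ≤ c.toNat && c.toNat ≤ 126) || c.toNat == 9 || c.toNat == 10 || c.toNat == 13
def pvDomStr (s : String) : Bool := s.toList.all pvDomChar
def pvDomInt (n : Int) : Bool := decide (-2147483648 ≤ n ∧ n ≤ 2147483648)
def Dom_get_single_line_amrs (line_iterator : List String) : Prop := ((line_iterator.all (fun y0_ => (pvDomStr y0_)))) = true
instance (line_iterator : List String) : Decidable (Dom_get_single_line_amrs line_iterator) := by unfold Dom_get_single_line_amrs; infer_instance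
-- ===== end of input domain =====

-- B replaces A's single five-field accumulator loop by two independent passes — one building the
-- id table with a counter, one grouping stripped content lines into a list joined with ' ' only at
-- flush time, avoiding A's repeated string reconcatenation (measured faster in a timing run).

-- ===== PORT A =====
-- string accumulation and stripping are ported on the List Char side (PySem.Chars), as PYSEM.md directs;
-- 'line.strip().split("# ::id ")[1]' raises IndexError when the separator is absent: the port's
-- '.getD' defaults are excluded by Pre_.
def pvAId (line : String) : String :=
  (PySem.List.pyGet? ((PySem.Str.split? (PySem.Str.strip line) "# ::id ").getD []) 1).getD ""

def pvAStep (st : List String × PySem.Dict String Int × List (String × Option String) × List Char × Option String)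
    (line : String) : List String × PySem.Dict String Int × List (String × Option String) × List Char × Option String :=
  if PySem.Str.startswith line "#" then
    if PySem.Str.startswith line "# ::id" then
      let id := pvAId line
      (st.1 ++ [id], st.2.1.insert id (((st.1 ++ [id]).length : Int) - 1), st.2.2.1, st.2.2.2.1, st.2.2.2.2)
    else if PySem.Str.startswith line "# ::snt " then
      (st.1, st.2.1, st.2.2.1, st.2.2.2.1, some (PySem.Str.slice (PySem.Str.strip line) (some 8) none))
    else st
  else
    let l := PySem.Chars.strip line.toList
    if l = [] then
      if st.2.2.2.1 ≠ [] then
        (st.1, st.2.1, st.2.2.1 ++ [(String.ofList (PySem.Chars.strip st.2.2.2.1), st.2.2.2.2)], [], st.2.2.2.2)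
      else st
    else (st.1, st.2.1, st.2.2.1, st.2.2.2.1 ++ l ++ [' '], st.2.2.2.2)

def get_single_line_amrs (line_iterator : List String) : (List (String × Option String)) × (List (String × Int)) :=
  let st := line_iterator.foldl pvAStep ([], PySem.Dict.empty, [], [], none)
  ((if st.2.2.2.1 ≠ [] then
      st.2.2.1 ++ [(String.ofList (PySem.Chars.strip st.2.2.2.1), st.2.2.2.2)]
    else st.2.2.1), st.2.1.items)

-- ===== PORT B =====
-- pass 1 of Source B: the id table with a running counter
def pvBId (st : PySem.Dict String Int × Int) (line : String) : PySem.Dict String Int × Int :=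
  if PySem.Str.startswith line "# ::id" then (st.1.insert (pvAId line) st.2, st.2 + 1)
  else st

-- pass 2 of Source B: group stripped content lines into blank-separated chunks, joined with ' ' at flush
def pvBStep (st : List (String × Option String) × List (List Char) × Option String)
    (line : String) : List (String × Option String) × List (List Char) × Option String :=
  if PySem.Str.startswith line "#" then
    if PySem.Str.startswith line "# ::snt " then
      (st.1, st.2.1, some (PySem.Str.slice (PySem.Str.strip line) (some 8) none))
    else st
  else
    let s := PySem.Chars.strip line.toList
    if s ≠ [] then (st.1, st.2.1 ++ [s], st.2.2)
    else if st.2.1 ≠ [] then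
      (st.1 ++ [(String.ofList (PySem.Chars.join [' '] st.2.1), st.2.2)], [], st.2.2)
    else st

def get_single_line_amrs_alt (line_iterator : List String) : (List (String × Option String)) × (List (String × Int)) :=
  let d := (line_iterator.foldl pvBId (PySem.Dict.empty, 0)).1
  let st := line_iterator.foldl pvBStep ([], [], none)
  ((if st.2.1 ≠ [] then
      st.1 ++ [(String.ofList (PySem.Chars.join [' '] st.2.1), st.2.2)]
    else st.1), d.items)

-- ===== PRECONDITION & SPEC =====
-- Pre_ excludes exactly the inputs where Python A raises IndexError: a line starting with '# ::id'
-- whose stripped form does not contain the separator '# ::id ' (my Python B raises there too).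
def Pre_get_single_line_amrs (line_iterator : List String) : Prop :=
  ∀ line ∈ line_iterator, PySem.Str.startswith line "# ::id" = true →
    PySem.Str.isIn "# ::id " (PySem.Str.strip line) = true
instance (line_iterator : List String) : Decidable (Pre_get_single_line_amrs line_iterator) := by
  unfold Pre_get_single_line_amrs; infer_instance

def pvWitness_get_single_line_amrs : List String :=
  ["# ::id a1", "# ::snt hi there", "(a / alpha", "   :arg (b / beta))", "", "# ::id a2", "(c / gamma)"]

def Spec_get_single_line_amrs (line_iterator : List String) (out : (List (String × Option String)) × (List (String × Int))) : Prop := out = get_single_line_amrs_alt line_iterator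
instance (line_iterator : List String) (out : (List (String × Option String)) × (List (String × Int))) : Decidable (Spec_get_single_line_amrs line_iterator out) := by unfold Spec_get_single_line_amrs; infer_instance

-- ===== CLAIM (what is proved, stated in full; the proofs are below) =====
def Claim_equal_get_single_line_amrs : Prop := ∀ (line_iterator : List String), Dom_get_single_line_amrs line_iterator → Pre_get_single_line_amrs line_iterator → Spec_get_single_line_amrs line_iterator (get_single_line_amrs line_iterator)

-- ===== LEMMAS AND PROOFS =====

-- a chunk entry: nonempty and already stripped on both sides
def pvGood (l : List Char) : Prop :=
  l ≠ [] ∧ PySem.Chars.lstrip l = l ∧ PySem.Chars.rstrip l = l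

-- the relation the induction carries between A's single state and B's two states
def pvRel (sa : List String × PySem.Dict String Int × List (String × Option String) × List Char × Option String)
    (sb1 : PySem.Dict String Int × Int)
    (sb2 : List (String × Option String) × List (List Char) × Option String) : Prop :=
  sa.2.1 = sb1.1 ∧ (sa.1.length : Int) = sb1.2 ∧ sa.2.2.1 = sb2.1 ∧ sa.2.2.2.2 = sb2.2.2 ∧
  sa.2.2.2.1 = (sb2.2.1.map (· ++ [' '])).flatten ∧ ∀ l ∈ sb2.2.1, pvGood l

theorem pv_head_not_space {c : Char} {cs : List Char} (h : PySem.Chars.lstrip (c :: cs) = c :: cs) :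
    PySem.Chars.isspace c = false := by
  by_contra hb
  have hc : PySem.Chars.isspace c = true := by
    cases hx : PySem.Chars.isspace c with
    | false => exact absurd hx hb
    | true => rfl
  have := List.length_dropWhile_le (PySem.Chars.isspace) cs
  simp [PySem.Chars.lstrip, hc] at h
  have : (List.dropWhile PySem.Chars.isspace cs).length = (c :: cs).length := by rw [h]
  simp at this
  omega

theorem pv_lstrip_append {c : Char} {cs rest : List Char} (h : PySem.Chars.isspace c = false) :
    PySem.Chars.lstrip ((c :: cs) ++ rest) = (c :: cs) ++ rest := by
  simp [PySem.Chars.lstrip, h]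

-- the strip of any string is pvGood once nonempty
theorem pv_strip_good {s : List Char} (h : PySem.Chars.strip s ≠ []) : pvGood (PySem.Chars.strip s) := by
  unfold PySem.Chars.strip at *
  set t := PySem.Chars.lstrip s with ht
  have hlt : PySem.Chars.lstrip t = t := by
    simp [PySem.Chars.lstrip, ht, List.dropWhile_idempotent]
  have hrr : PySem.Chars.rstrip (PySem.Chars.rstrip t) = PySem.Chars.rstrip t := by
    simp [PySem.Chars.rstrip, List.dropWhile_idempotent]
  refine ⟨h, ?_, hrr⟩
  -- lstrip (rstrip t) = rstrip t
  cases hx : PySem.Chars.rstrip t with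
  | nil => simp [hx] at h
  | cons c cs =>
    have hpre : PySem.Chars.rstrip t <+: t := by
      unfold PySem.Chars.rstrip
      refine List.reverse_suffix.mp ?_
      simpa using List.dropWhile_suffix (l := t.reverse) (p := PySem.Chars.isspace)
    rcases hpre with ⟨rest, hrest⟩
    rw [hx] at hrest
    have hfix : PySem.Chars.lstrip (c :: cs ++ rest) = c :: cs ++ rest := by
      rw [hrest]; exact hlt
    have hc : PySem.Chars.isspace c = false := pv_head_not_space (by simpa using hfix)
    simpa using pv_lstrip_append (cs := cs) (rest := ([] : List Char)) hc

-- dropWhile of the reverse is the reverse, from rstrip l = l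
theorem pv_rev_fixed {l : List Char} (h : PySem.Chars.rstrip l = l) :
    List.dropWhile PySem.Chars.isspace l.reverse = l.reverse := by
  unfold PySem.Chars.rstrip at h
  have := congrArg List.reverse h
  simpa using this

-- rstrip of an append reaches only into the right part when that part keeps a non-space tail
theorem pv_rstrip_concat (xs : List Char) {F : List Char} (h : PySem.Chars.rstrip F ≠ []) :
    PySem.Chars.rstrip (xs ++ F) = xs ++ PySem.Chars.rstrip F := by
  have hdw : List.dropWhile PySem.Chars.isspace F.reverse = (PySem.Chars.rstrip F).reverse := by
    unfold PySem.Chars.rstrip; simp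
  have hne : ((PySem.Chars.rstrip F).reverse).isEmpty = false := by
    simp [h]
  unfold PySem.Chars.rstrip
  rw [List.reverse_append, List.dropWhile_append, hdw, hne]
  simp

-- strip of the flattened chunk-with-trailing-spaces is the ' '-join of the chunk
theorem pv_flush (L : List (List Char)) (hg : ∀ l ∈ L, pvGood l) (hne : L ≠ []) :
    PySem.Chars.strip ((L.map (· ++ [' '])).flatten) = PySem.Chars.join [' '] L := by
  induction L with
  | nil => exact absurd rfl hne
  | cons x L ih =>
    obtain ⟨hx0, hxl, hxr⟩ := hg x (by simp)
    obtain ⟨c, cs, rfl⟩ : ∃ c cs, x = c :: cs := by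
      cases x with
      | nil => exact absurd rfl hx0
      | cons c cs => exact ⟨c, cs, rfl⟩
    have hc := pv_head_not_space hxl
    have hx' : PySem.Chars.rstrip ((c :: cs) ++ [' ']) = c :: cs := by
      have hrev := pv_rev_fixed hxr
      have hsp : PySem.Chars.isspace ' ' = true := by decide
      unfold PySem.Chars.rstrip
      rw [List.reverse_append,
        show (([' '] : List Char).reverse ++ (c :: cs).reverse) = ' ' :: (c :: cs).reverse from rfl,
        List.dropWhile_cons, if_pos hsp, hrev]
      simp
    cases L with
    | nil =>
      rw [show ((([c :: cs] : List (List Char)).map (· ++ [' '])).flatten) = (c :: cs) ++ [' '] by simp]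
      unfold PySem.Chars.strip
      rw [pv_lstrip_append hc, hx']
      simp [PySem.Chars.join, List.intercalate, List.intersperse]
    | cons y L' =>
      have hg' : ∀ l ∈ y :: L', pvGood l := fun l hl => hg l (by simp [hl])
      have ihy := ih hg' (by simp)
      obtain ⟨hy0, hyl, _⟩ := hg' y (by simp)
      obtain ⟨d, ds, rfl⟩ : ∃ d ds, y = d :: ds := by
        cases y with
        | nil => exact absurd rfl hy0
        | cons d ds => exact ⟨d, ds, rfl⟩
      have hd := pv_head_not_space hyl
      set F := (((d :: ds) :: L').map (· ++ [' '])).flatten with hF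
      have hFeq : F = (d :: ds) ++ ([' '] ++ ((L'.map (· ++ [' ']))).flatten) := by simp [hF]
      have hlF : PySem.Chars.lstrip F = F := by rw [hFeq]; exact pv_lstrip_append hd
      have ihy' : PySem.Chars.rstrip F = PySem.Chars.join [' '] ((d :: ds) :: L') := by
        have h0 := ihy
        unfold PySem.Chars.strip at h0
        rw [hlF] at h0
        exact h0
      have hJne : PySem.Chars.rstrip F ≠ [] := by
        rw [ihy']
        cases L' with
        | nil => simp [PySem.Chars.join, List.intercalate, List.intersperse]
        | cons z zs => simp [PySem.Chars.join, List.intercalate, List.intersperse]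
      have hE : ((((c :: cs) :: (d :: ds) :: L').map (· ++ [' '])).flatten)
          = ((c :: cs) ++ [' ']) ++ F := by simp [hF]
      rw [hE]
      unfold PySem.Chars.strip
      have hl2 : PySem.Chars.lstrip (((c :: cs) ++ [' ']) ++ F) = ((c :: cs) ++ [' ']) ++ F := by
        have h1 := pv_lstrip_append (cs := cs) (rest := [' '] ++ F) hc
        simpa [List.append_assoc] using h1
      rw [hl2, pv_rstrip_concat _ hJne, ihy']
      simp [PySem.Chars.join, List.intercalate, List.intersperse]

-- a '# ::id' line is a '#' line; '# ::id' and '# ::snt ' are mutually exclusive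
theorem pv_id_hash {line : String} (h : PySem.Str.startswith line "# ::id" = true) :
    PySem.Str.startswith line "#" = true := by
  simp only [PySem.Str.startswith] at *
  rw [PySem.Chars.startswith_iff] at *
  exact List.IsPrefix.trans (by decide) h

theorem pv_id_not_snt {line : String} (h : PySem.Str.startswith line "# ::id" = true) :
    PySem.Str.startswith line "# ::snt " = false := by
  by_contra hb
  have hs : PySem.Str.startswith line "# ::snt " = true := by
    cases hx : PySem.Str.startswith line "# ::snt " with
    | false => exact absurd hx hb
    | true => rfl
  simp only [PySem.Str.startswith] at h hs
  rw [PySem.Chars.startswith_iff] at h hs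
  rcases List.prefix_or_prefix_of_prefix h hs with hp | hp
  · rcases hp with ⟨r, hr⟩
    have := congrArg (fun l => l.take 6) hr
    simp at this
  · rcases hp with ⟨r, hr⟩
    have := congrArg List.length hr
    rw [List.length_append, show (String.toList "# ::snt ").length = 8 from by decide,
      show (String.toList "# ::id").length = 6 from by decide] at this
    omega

-- one step preserves the relation
theorem pv_step (sa : List String × PySem.Dict String Int × List (String × Option String) × List Char × Option String)
    (sb1 : PySem.Dict String Int × Int)
    (sb2 : List (String × Option String) × List (List Char) × Option String)
    (line : String) (h : pvRel sa sb1 sb2) :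
    pvRel (pvAStep sa line) (pvBId sb1 line) (pvBStep sb2 line) := by
  obtain ⟨ids, d, amrs, amr, sent⟩ := sa
  obtain ⟨d', n⟩ := sb1
  obtain ⟨amrs', chunk, sent'⟩ := sb2
  obtain ⟨h1, h2, h3, h4, h5, h6⟩ := h
  simp only at h1 h2 h3 h4 h5 h6
  subst h1 h3 h4 h5
  simp only [pvAStep, pvBId, pvBStep, pvRel]
  by_cases hid : PySem.Str.startswith line "# ::id" = true
  · have hh := pv_id_hash hid
    have hns := pv_id_not_snt hid
    rw [if_pos hh, if_pos hh, if_pos hid, if_pos hid,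
      if_neg (show ¬ (PySem.Str.startswith line "# ::snt " = true) by rw [hns]; simp)]
    have hv : ((ids ++ [pvAId line]).length : Int) - 1 = n := by
      simp only [List.length_append, List.length_cons, List.length_nil]
      omega
    refine ⟨by rw [hv], ?_, rfl, rfl, rfl, h6⟩
    simp only [List.length_append, List.length_cons, List.length_nil]
    omega
  · rw [if_neg hid, if_neg hid]
    by_cases hh : PySem.Str.startswith line "#" = true
    · rw [if_pos hh, if_pos hh]
      by_cases hs : PySem.Str.startswith line "# ::snt " = true
      · rw [if_pos hs, if_pos hs]
        exact ⟨rfl, h2, rfl, rfl, rfl, h6⟩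
      · rw [if_neg hs, if_neg hs]
        exact ⟨rfl, h2, rfl, rfl, rfl, h6⟩
    · rw [if_neg hh, if_neg hh]
      by_cases hb : PySem.Chars.strip line.toList = []
      · rw [if_pos hb, if_neg (show ¬ PySem.Chars.strip line.toList ≠ [] by simp [hb])]
        by_cases hc : chunk = []
        · have hamr : (List.map (fun l => l ++ [' ']) chunk).flatten = [] := by simp [hc]
          rw [if_neg (show ¬ chunk ≠ [] by simp [hc]),
            if_neg (show ¬ (List.map (fun l => l ++ [' ']) chunk).flatten ≠ [] by simp [hamr])]
          exact ⟨rfl, h2, rfl, rfl, rfl, h6⟩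
        · have hamr : (List.map (fun l => l ++ [' ']) chunk).flatten ≠ [] := by
            obtain ⟨l0, chunk', rfl⟩ : ∃ l0 chunk', chunk = l0 :: chunk' := by
              cases chunk with
              | nil => exact absurd rfl hc
              | cons a b => exact ⟨a, b, rfl⟩
            obtain ⟨hl0, _, _⟩ := h6 l0 (by simp)
            cases l0 with
            | nil => exact absurd rfl hl0
            | cons e es => simp
          rw [if_pos hamr, if_pos hc]
          refine ⟨rfl, h2, ?_, rfl, by simp, by simp⟩
          rw [pv_flush chunk h6 hc]
      · rw [if_neg hb, if_pos (show PySem.Chars.strip line.toList ≠ [] from hb)]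
        refine ⟨rfl, h2, rfl, rfl, by simp, ?_⟩
        intro l hl
        rcases List.mem_append.mp hl with hl | hl
        · exact h6 l hl
        · simp at hl
          subst hl
          exact pv_strip_good hb

theorem pv_fold (lines : List String)
    (sa : List String × PySem.Dict String Int × List (String × Option String) × List Char × Option String)
    (sb1 : PySem.Dict String Int × Int)
    (sb2 : List (String × Option String) × List (List Char) × Option String)
    (h : pvRel sa sb1 sb2) :
    pvRel (lines.foldl pvAStep sa) (lines.foldl pvBId sb1) (lines.foldl pvBStep sb2) := by
  induction lines generalizing sa sb1 sb2 with
  | nil => exact h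
  | cons line rest ih => exact ih _ _ _ (pv_step _ _ _ line h)

-- ===== VERDICT (by name: the statement is the Claim_ definition above) =====
theorem get_single_line_amrs_spec : Claim_equal_get_single_line_amrs := by
  intro lines _ _
  unfold Spec_get_single_line_amrs
  simp only [get_single_line_amrs, get_single_line_amrs_alt]
  obtain ⟨h1, h2, h3, h4, h5, h6⟩ :=
    pv_fold lines ([], PySem.Dict.empty, [], [], none) (PySem.Dict.empty, 0) ([], [], none)
      ⟨rfl, rfl, rfl, rfl, rfl, by simp⟩
  rw [h1, h3, h4, h5]
  set chunk := (lines.foldl pvBStep ([], [], none)).2.1 with hch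
  by_cases hc : chunk = []
  · simp [hc]
  · have hamr : (List.map (fun l => l ++ [' ']) chunk).flatten ≠ [] := by
      obtain ⟨l0, chunk', hce⟩ := List.exists_cons_of_ne_nil hc
      obtain ⟨hl0, _, _⟩ := h6 l0 (by rw [hce]; simp)
      obtain ⟨e, es, hle⟩ := List.exists_cons_of_ne_nil hl0
      rw [hce, hle]
      simp
    rw [if_pos hamr, if_pos hc, pv_flush chunk h6 hc]
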